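-- pv_equiv track=rewrite | github.com/amedeos/image-cgroupsv2-inspector | src/image_analyzer.py | _check_node_compatibility
-- ===== SOURCE A (Python) =====
-- def _check_node_compatibility(version: str) -> bool:
--     """
--     Check if Node.js version is compatible with cgroup v2.
--
--     Minimum version: 20.3.0
--
--     Args:
--         version: Node.js version string
--
--     Returns:
--         True if compatible
--     """
--     try:
--         parts = [int(p) for p in version.split(".")]
--
--         if len(parts) < 3:
--             return False
--
--         major, minor, patch = parts[0], parts[1], parts[2]
--
--         # Need 20.3.0+
--         if major > 20:
--             return True
--         if major == 20:
--             if minor > 3: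
--                 return True
--             if minor == 3:
--                 return patch >= 0
--
--         return False
--
--     except Exception:
--         return False
-- ===== SOURCE B (Python) =====
-- _MIN_NODE_VERSION = (20, 3, 0)
--
--
-- def _check_node_compatibility(version: str) -> bool:
--     try:
--         parts = [int(p) for p in version.split(".")]
--     except Exception:
--         return False
--     if len(parts) < 3:
--         return False
--     # generic first-difference scan against the minimum version
--     for have, need in zip(parts, _MIN_NODE_VERSION):
--         if have != need:
--             return have > need
--     return True
-- ===== Notes on version B (the rewrite author's own statement) =====
-- stated objective: alternative
-- what changed: Replaces A's hard-coded major/minor/patch if-cascade by a generic first-difference scan: a loop over zip(parts, (20,3,0)) that returns have > need at the first component that differs, making the minimum version a data constant instead of inlined branch logic.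
import Mathlib
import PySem

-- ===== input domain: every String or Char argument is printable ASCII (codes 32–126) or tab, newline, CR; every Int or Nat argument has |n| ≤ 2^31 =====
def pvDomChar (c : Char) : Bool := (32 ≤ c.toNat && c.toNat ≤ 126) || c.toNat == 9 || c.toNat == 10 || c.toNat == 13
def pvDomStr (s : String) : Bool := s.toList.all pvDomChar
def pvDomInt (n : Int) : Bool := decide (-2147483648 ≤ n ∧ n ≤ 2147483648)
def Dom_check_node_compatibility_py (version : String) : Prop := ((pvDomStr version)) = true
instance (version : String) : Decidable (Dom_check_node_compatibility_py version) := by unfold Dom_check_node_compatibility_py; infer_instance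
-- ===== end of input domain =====

-- ===== PORT A =====
-- B replaces A's hard-coded if-cascade by a generic first-difference scan over zip(parts, MIN) (alternative decomposition; same cost).
-- the list comprehension [int(p) for p in version.split(".")]: explicit recursion, none = a ValueError somewhere
def pvParseA : List (List Char) → Option (List Int)
  | [] => some []
  | p :: rest =>
    match PySem.Int.ofChars? p with
    | none => none
    | some n =>
      match pvParseA rest with
      | none => none
      | some ns => some (n :: ns)

def check_node_compatibility_py (version : String) : Bool :=
  match pvParseA (PySem.Chars.splitOn version.toList ['.']) with
  | none => false                                   -- except Exception: return False
  | some parts =>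
    if parts.length < 3 then false
    else
      let major := PySem.List.pyGetD parts 0 0
      let minor := PySem.List.pyGetD parts 1 0
      let patch := PySem.List.pyGetD parts 2 0
      if major > 20 then true
      else if major == 20 then
        if minor > 3 then true
        else if minor == 3 then patch ≥ 0
        else false
      else false

-- ===== PORT B =====
-- the for-loop over zip(parts, _MIN_NODE_VERSION): return have > need at the first differing pair
def pvLexScan : List (Int × Int) → Bool
  | [] => true
  | (have_, need) :: rest => if have_ ≠ need then have_ > need else pvLexScan rest

def check_node_compatibility_py_alt (version : String) : Bool :=
  match (PySem.Chars.splitOn version.toList ['.']).mapM PySem.Int.ofChars? with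
  | none => false
  | some parts =>
    if parts.length < 3 then false
    else pvLexScan (parts.zip [20, 3, 0])

-- ===== PRECONDITION & SPEC =====
def Spec_check_node_compatibility_py (version : String) (out : Bool) : Prop := out = check_node_compatibility_py_alt version
instance (version : String) (out : Bool) : Decidable (Spec_check_node_compatibility_py version out) := by unfold Spec_check_node_compatibility_py; infer_instance

-- ===== CLAIM (what is proved, stated in full; the proofs are below) =====
def Claim_equal_check_node_compatibility_py : Prop := ∀ (version : String), Dom_check_node_compatibility_py version → Spec_check_node_compatibility_py version (check_node_compatibility_py version)

-- ===== LEMMAS AND PROOFS =====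
theorem pvParseA_eq_mapM (xs : List (List Char)) : pvParseA xs = xs.mapM PySem.Int.ofChars? := by
  induction xs with
  | nil => rfl
  | cons p rest ih =>
    simp [pvParseA, List.mapM_cons, ih]
    cases PySem.Int.ofChars? p <;> cases rest.mapM PySem.Int.ofChars? <;> simp [Option.bind]

-- ===== VERDICT (by name: the statement is the Claim_ definition above) =====
theorem check_node_compatibility_py_spec : Claim_equal_check_node_compatibility_py := by
  intro version _
  unfold Spec_check_node_compatibility_py check_node_compatibility_py check_node_compatibility_py_alt
  rw [pvParseA_eq_mapM]
  cases h : (PySem.Chars.splitOn version.toList ['.']).mapM PySem.Int.ofChars? with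
  | none => rfl
  | some parts =>
    simp only []
    by_cases hlen : parts.length < 3
    · simp [hlen]
    · match parts, hlen with
      | [], h => exact absurd (by simp) h
      | [_], h => exact absurd (by simp) h
      | [_, _], h => exact absurd (by simp) h
      | a :: b :: c :: rest, _ =>
        simp [pvLexScan, List.zip, PySem.List.pyGetD_ofNat']
        by_cases h1 : a > 20 <;> by_cases h2 : a = 20 <;> by_cases h3 : b > 3 <;> by_cases h4 : b = 3 <;>
          simp [h1, h2, h3, h4] <;> first
            | omega
            | (by_cases hc : (0:Int) ≤ c <;> simp [hc] <;> omega)
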